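-- pv_equiv track=rewrite | github.com/tuanngocfun/DNA_storage_locally_balance | src/lbcode/verifier.py | is_locally_balanced_with_info
-- ===== SOURCE A (Python) =====
-- from typing import Tuple
--
-- def is_locally_balanced_with_info(x: str, ell: int, delta: int) -> Tuple[bool, str]:
--     """
--     Same as is_locally_balanced but returns failure info.
--
--     Returns:
--         (is_valid, message) tuple
--     """
--     n = len(x)
--
--     if ell % 2 != 0:
--         return False, "ℓ must be even"
--
--     if n < ell:
--         return True, "Pass (vacuously true: n < ℓ)"
--
--     lo = ell // 2 - delta
--     hi = ell // 2 + delta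
--
--     prefix = [0] * (n + 1)
--     for i, ch in enumerate(x):
--         prefix[i + 1] = prefix[i] + (1 if ch == '1' else 0)
--
--     for i in range(n - ell + 1):
--         weight = prefix[i + ell] - prefix[i]
--         if weight < lo or weight > hi:
--             window = x[i:i + ell]
--             return False, f"Fail at index {i}: window '{window}' has weight {weight} (valid: [{lo},{hi}])"
--
--     return True, "Pass"
-- ===== SOURCE B (Python) =====
-- def is_locally_balanced_with_info(x, ell, delta):
--     if ell % 2 != 0:
--         return False, "ℓ must be even"
--     n = len(x)
--     if n < ell:
--         return True, "Pass (vacuously true: n < ℓ)"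
--     lo = ell // 2 - delta
--     hi = ell // 2 + delta
--     i = 0
--     while i + ell <= n:
--         win = x[i:i + ell]
--         w = sum(c == '1' for c in win)
--         if w < lo or w > hi:
--             return False, f"Fail at index {i}: window '{win}' has weight {w} (valid: [{lo},{hi}])"
--         i += 1
--     return True, "Pass"
-- ===== Notes on version B (the rewrite author's own statement) =====
-- stated objective: simpler
-- what changed: Drops A's precomputed prefix-sum array entirely: a single while loop slices each window out of the string and counts its '1's directly, checking it on the spot.
import Mathlib
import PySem

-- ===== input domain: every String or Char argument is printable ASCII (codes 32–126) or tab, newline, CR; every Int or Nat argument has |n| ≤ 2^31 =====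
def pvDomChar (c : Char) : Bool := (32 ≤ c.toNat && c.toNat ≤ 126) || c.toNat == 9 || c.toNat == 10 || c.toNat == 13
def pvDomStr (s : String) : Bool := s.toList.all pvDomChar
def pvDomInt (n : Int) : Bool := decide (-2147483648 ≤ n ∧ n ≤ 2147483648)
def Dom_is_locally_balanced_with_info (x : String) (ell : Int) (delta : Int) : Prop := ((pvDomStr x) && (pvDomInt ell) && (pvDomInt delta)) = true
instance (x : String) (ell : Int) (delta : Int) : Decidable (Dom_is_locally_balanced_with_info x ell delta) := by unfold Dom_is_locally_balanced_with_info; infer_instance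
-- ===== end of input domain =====

-- B drops A's prefix-sum array: one while loop slices each window and counts its '1's directly (simpler decomposition).
-- Both Pythons build the identical failure f-string; it is ported once as pvFailMsg and used by both ports.
def pvFailMsg (i : Int) (window : String) (weight lo hi : Int) : String :=
  "Fail at index " ++ PySem.Int.toStr i ++ ": window '" ++ window ++ "' has weight " ++
    PySem.Int.toStr weight ++ " (valid: [" ++ PySem.Int.toStr lo ++ "," ++ PySem.Int.toStr hi ++ "])"

-- ===== PORT A =====
-- A's scan loop over `range(n - ell + 1)`; `prefix[j]` is ported as pyGetD with default 0 (on the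
-- Pre_-admitted inputs that reach this loop every index is in range, so the default is never used).
def pvLoopA (x : String) (pfx : List Int) (ell lo hi : Int) : List Int → Bool × String
  | [] => (true, "Pass")
  | i :: rest =>
    let weight := PySem.List.pyGetD pfx (i + ell) 0 - PySem.List.pyGetD pfx i 0
    if weight < lo ∨ weight > hi then
      (false, pvFailMsg i (PySem.Str.slice x (some i) (some (i + ell))) weight lo hi)
    else pvLoopA x pfx ell lo hi rest

def is_locally_balanced_with_info (x : String) (ell : Int) (delta : Int) : Bool × String :=
  let n := x.toList.length
  if PySem.Int.mod ell 2 ≠ 0 then (false, "ℓ must be even")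
  else if (n : Int) < ell then (true, "Pass (vacuously true: n < ℓ)")
  else
    let lo := PySem.Int.floordiv ell 2 - delta
    let hi := PySem.Int.floordiv ell 2 + delta
    -- prefix = [0]*(n+1); prefix[i+1] = prefix[i] + (1 if ch == '1' else 0)  (enumerate indices are ≥ 0, so .toNat is exact)
    let pfx := (PySem.List.enumerate x.toList 0).foldl
      (fun p ic => p.set (ic.1 + 1).toNat (PySem.List.pyGetD p ic.1 0 + (if ic.2 == '1' then 1 else 0)))
      (List.replicate (n + 1) (0 : Int))
    pvLoopA x pfx ell lo hi (PySem.List.pyRange 0 ((n : Int) - ell + 1))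

-- ===== PORT B =====
-- B's `while i + ell <= n` loop: fuel = the trip count (n - ell + 1 on the admitted inputs, where
-- 0 ≤ ell ≤ n holds whenever the loop is reached); each step slices the window and counts fresh.
def pvScanB (x : String) (ell lo hi : Int) : Nat → Int → Bool × String
  | 0, _ => (true, "Pass")
  | Nat.succ fuel, i =>
    let win := PySem.Str.slice x (some i) (some (i + ell))
    let w := win.toList.foldl (fun acc c => acc + (if c == '1' then 1 else 0)) (0 : Int)
    if w < lo ∨ w > hi then (false, pvFailMsg i win w lo hi)
    else pvScanB x ell lo hi fuel (i + 1)

def is_locally_balanced_with_info_alt (x : String) (ell : Int) (delta : Int) : Bool × String :=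
  if PySem.Int.mod ell 2 ≠ 0 then (false, "ℓ must be even")
  else
    let n := x.toList.length
    if (n : Int) < ell then (true, "Pass (vacuously true: n < ℓ)")
    else
      pvScanB x ell (PySem.Int.floordiv ell 2 - delta) (PySem.Int.floordiv ell 2 + delta)
        ((n : Int) - ell + 1).toNat 0

-- ===== PRECONDITION & SPEC =====
-- Pre_ excludes negative even ell (a meaningless window length): there A returns accidental
-- negative-index-wraparound values of its prefix array and string slices, while B's loop simply
-- scans the (mostly empty) windows — an artefact corner no caller would specify either way.
def Pre_is_locally_balanced_with_info (x : String) (ell : Int) (delta : Int) : Prop :=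
  PySem.Int.mod ell 2 ≠ 0 ∨ 0 ≤ ell
instance (x : String) (ell : Int) (delta : Int) : Decidable (Pre_is_locally_balanced_with_info x ell delta) := by
  unfold Pre_is_locally_balanced_with_info; infer_instance
def pvWitness_is_locally_balanced_with_info : String × Int × Int := ("0110", 2, 1)

def Spec_is_locally_balanced_with_info (x : String) (ell : Int) (delta : Int) (out : Bool × String) : Prop :=
  out = is_locally_balanced_with_info_alt x ell delta
instance (x : String) (ell : Int) (delta : Int) (out : Bool × String) : Decidable (Spec_is_locally_balanced_with_info x ell delta out) := by
  unfold Spec_is_locally_balanced_with_info; infer_instance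

-- ===== CLAIM (what is proved, stated in full; the proofs are below) =====
def Claim_equal_is_locally_balanced_with_info : Prop := ∀ (x : String) (ell : Int) (delta : Int), Dom_is_locally_balanced_with_info x ell delta → Pre_is_locally_balanced_with_info x ell delta → Spec_is_locally_balanced_with_info x ell delta (is_locally_balanced_with_info x ell delta)

-- ===== LEMMAS AND PROOFS =====

-- window weight: number of '1' characters in cs[i : i+L]
def pvW (cs : List Char) (L i : Nat) : Int := (((cs.drop i).take L).countP (· == '1') : Int)

-- A's prefix-building fold computes the prefix counts of '1'
lemma pvPfx_go (orig : List Char) : ∀ (suf : List Char) (s : Nat) (p : List Int),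
    p.length = orig.length + 1 → suf = orig.drop s → s ≤ orig.length →
    (∀ k ≤ s, p.getD k 0 = ((orig.take k).countP (· == '1') : Int)) →
    ∀ k ≤ orig.length,
      ((PySem.List.enumerate suf (s : Int)).foldl
        (fun p ic => p.set (ic.1 + 1).toNat (PySem.List.pyGetD p ic.1 0 + (if ic.2 == '1' then 1 else 0))) p).getD k 0
      = ((orig.take k).countP (· == '1') : Int) := by
  intro suf
  induction suf with
  | nil =>
    intro s p hlen hsuf hs hinv k hk
    have hse : orig.length ≤ s := List.drop_eq_nil_iff.mp hsuf.symm
    simpa [PySem.List.enumerate] using hinv k (by omega)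
  | cons c t ih =>
    intro s p hlen hsuf hs hinv k hk
    have hslt : s < orig.length := by
      by_contra h
      rw [List.drop_eq_nil_iff.mpr (by omega)] at hsuf
      simp at hsuf
    have hcons := List.drop_eq_getElem_cons hslt
    rw [hcons] at hsuf
    injection hsuf.symm with hget ht
    rw [PySem.List.enumerate_cons]
    simp only [List.foldl_cons]
    have hsn : ((s : Int) + 1).toNat = s + 1 := by omega
    have hgd : PySem.List.pyGetD p (s : Int) 0 = ((orig.take s).countP (· == '1') : Int) := by
      rw [PySem.List.pyGetD_natCast]; exact hinv s (le_refl s)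
    rw [hsn, hgd]
    apply ih (s + 1) _ (by simpa using hlen)
    · exact ht.symm
    · omega
    · intro k hk
      rw [List.getD_eq_getElem?_getD, List.getElem?_set]
      rcases Nat.lt_or_ge k (s + 1) with hlt | hge
      · rw [if_neg (by omega), ← List.getD_eq_getElem?_getD]
        exact hinv k (by omega)
      · have hke : k = s + 1 := by omega
        subst hke
        rw [if_pos rfl, if_pos (by omega)]
        rw [List.take_add_one, List.countP_append]
        have : orig[s]? = some c := by rw [List.getElem?_eq_getElem hslt, hget]
        rw [this]
        push_cast
        simp only [Option.toList, List.countP_cons, List.countP_nil, Option.getD_some]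
        by_cases hc : c == '1'
        · simp [hc]
        · simp [hc]
    · exact hk

-- B recounts the sliced window: its foldl equals the window weight pvW
lemma pvScanB_weight (x : String) (L s : Nat) :
    (PySem.Str.slice x (some (s : Int)) (some ((s : Int) + (L : Int)))).toList.foldl
      (fun acc c => acc + (if c == '1' then 1 else 0)) (0 : Int) = pvW x.toList L s := by
  simp only [PySem.Str.toList_slice, PySem.Chars.slice_eq_listSlice, PySem.List.slice_natCast_add]
  rw [PySem.List.foldl_add, PySem.List.sum_map_ite_one_zero (fun c => c == '1')]
  simp [pvW]

-- the two scan loops agree step for step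
lemma pvLoops_eq (x : String) (pfx : List Int) (L : Nat) (lo hi : Int)
    (hL : L ≤ x.toList.length)
    (hpfx : ∀ k ≤ x.toList.length, pfx.getD k 0 = ((x.toList.take k).countP (· == '1') : Int)) :
    ∀ (m s : Nat), s + m = x.toList.length - L + 1 →
    pvLoopA x pfx (L : Int) lo hi (PySem.List.pyRange (s : Int) ((x.toList.length - L + 1 : Nat) : Int)) =
    pvScanB x (L : Int) lo hi m (s : Int) := by
  intro m
  induction m with
  | zero =>
    intro s h2
    rw [PySem.List.pyRange_one_eq_nil (by exact_mod_cast Nat.le_of_eq (by omega))]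
    simp [pvLoopA, pvScanB]
  | succ m ih =>
    intro s h2
    have hlt : (s : Int) < ((x.toList.length - L + 1 : Nat) : Int) := by
      exact_mod_cast (by omega : s < x.toList.length - L + 1)
    rw [PySem.List.pyRange_one_cons hlt]
    simp only [pvLoopA, pvScanB]
    have hA : PySem.List.pyGetD pfx ((s : Int) + (L : Int)) 0 - PySem.List.pyGetD pfx (s : Int) 0
        = pvW x.toList L s := by
      have hcast : (s : Int) + (L : Int) = ((s + L : Nat) : Int) := by push_cast; ring
      rw [hcast, PySem.List.pyGetD_natCast, PySem.List.pyGetD_natCast,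
        hpfx (s + L) (by omega), hpfx s (by omega), pvW]
      rw [List.take_add, List.countP_append]
      push_cast; ring
    rw [hA, pvScanB_weight x L s]
    by_cases hcond : pvW x.toList L s < lo ∨ pvW x.toList L s > hi
    · rw [if_pos hcond, if_pos hcond]
    · rw [if_neg hcond, if_neg hcond]
      have hs1 : (s : Int) + 1 = ((s + 1 : Nat) : Int) := by push_cast; ring
      rw [hs1]
      exact ih (s + 1) (by omega)

-- ===== VERDICT (by name: the statement is the Claim_ definition above) =====
theorem is_locally_balanced_with_info_spec : Claim_equal_is_locally_balanced_with_info := by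
  intro x ell delta _ hpre
  unfold Spec_is_locally_balanced_with_info
  unfold is_locally_balanced_with_info is_locally_balanced_with_info_alt
  by_cases h1 : PySem.Int.mod ell 2 ≠ 0
  · simp only [if_pos h1]
  · simp only [if_neg h1]
    by_cases h2 : ((x.toList.length : Int) < ell)
    · simp only [if_pos h2]
    · simp only [if_neg h2]
      push_neg at h1 h2
      have hell : 0 ≤ ell := by
        rcases hpre with hp | hp
        · exact absurd h1 hp
        · exact hp
      obtain ⟨L, rfl⟩ : ∃ L : Nat, ell = (L : Int) := ⟨ell.toNat, (Int.toNat_of_nonneg hell).symm⟩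
      have hLn : L ≤ x.toList.length := by exact_mod_cast h2
      set pfx := (PySem.List.enumerate x.toList 0).foldl
            (fun p ic => p.set (ic.1 + 1).toNat (PySem.List.pyGetD p ic.1 0 + (if ic.2 == '1' then 1 else 0)))
            (List.replicate (x.toList.length + 1) (0 : Int)) with hpd
      have hpfx : ∀ k ≤ x.toList.length,
          pfx.getD k 0 = ((x.toList.take k).countP (· == '1') : Int) := by
        intro k hk
        rw [hpd]
        refine pvPfx_go x.toList x.toList 0 _ (by simp) (by simp) (by omega) ?_ k hk
        intro j hj
        have hj0 : j = 0 := by omega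
        subst hj0
        simp [List.getD_eq_getElem?_getD]
      have hrange : (x.toList.length : Int) - (L : Int) + 1 = ((x.toList.length - L + 1 : Nat) : Int) := by
        push_cast [Nat.cast_sub hLn]; ring
      rw [hrange]
      simp only [Int.toNat_natCast]
      have := pvLoops_eq x pfx L (PySem.Int.floordiv (L : Int) 2 - delta)
        (PySem.Int.floordiv (L : Int) 2 + delta) hLn hpfx (x.toList.length - L + 1) 0 (by omega)
      simpa using this
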